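-- pv_equiv track=rewrite | github.com/dimasmijares/pokemon-db | scripts/validate_data.py | duplicate_values
-- ===== SOURCE A (Python) =====
-- def duplicate_values(rows: list[dict[str, str]], columns: list[str]) -> list[tuple[str, int]]:
--     counts: dict[str, int] = {}
--     for row in rows:
--         key = " | ".join((row.get(column) or "").strip() for column in columns)
--         if not key.strip():
--             continue
--         counts[key] = counts.get(key, 0) + 1
--     return sorted((item for item in counts.items() if item[1] > 1), key=lambda item: item[0])
-- ===== SOURCE B (Python) =====
-- def duplicate_values(rows: list[dict[str, str]], columns: list[str]) -> list[tuple[str, int]]: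
--     keys: list[str] = []
--     for row in rows:
--         key = " | ".join((row.get(column) or "").strip() for column in columns)
--         if key.strip():
--             keys.append(key)
--     keys.sort()
--     out: list[tuple[str, int]] = []
--     i = 0
--     n = len(keys)
--     while i < n:
--         j = i
--         while j < n and keys[j] == keys[i]:
--             j += 1
--         if j - i > 1:
--             out.append((keys[i], j - i))
--         i = j
--     return out
-- ===== Notes on version B (the rewrite author's own statement) =====
-- stated objective: alternative
-- what changed: Replaces A's incremental dict-of-counts (hash counting then filter+sort of items) by a sort-then-scan: collect the non-empty composite keys, sort them, and sweep once over the sorted list counting each consecutive run, emitting runs of length > 1 (already in ascending key order).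
import Mathlib
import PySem

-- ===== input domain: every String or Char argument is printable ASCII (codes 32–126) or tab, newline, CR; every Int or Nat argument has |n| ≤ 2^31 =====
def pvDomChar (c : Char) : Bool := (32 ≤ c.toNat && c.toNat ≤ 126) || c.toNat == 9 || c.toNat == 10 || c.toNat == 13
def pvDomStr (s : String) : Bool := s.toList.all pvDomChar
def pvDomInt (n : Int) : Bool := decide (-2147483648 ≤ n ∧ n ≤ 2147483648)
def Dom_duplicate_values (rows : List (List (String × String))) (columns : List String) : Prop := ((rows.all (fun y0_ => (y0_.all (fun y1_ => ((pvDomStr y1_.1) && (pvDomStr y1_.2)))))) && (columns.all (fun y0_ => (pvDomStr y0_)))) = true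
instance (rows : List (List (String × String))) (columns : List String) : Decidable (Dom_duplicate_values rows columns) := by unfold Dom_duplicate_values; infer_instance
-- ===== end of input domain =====

-- B replaces A's incremental dict of counts by a sort-then-scan over the collected keys; alternative decomposition, same asymptotic cost.

-- ===== PORT A =====
-- shared helper: the composite key ' | '.join((row.get(c) or '').strip() for c in columns)
-- (row.get(c) or "" coincides with row.get(c, "") because the only falsy str is "")
def pvMkKey (columns : List String) (row : List (String × String)) : String :=
  PySem.Str.join " | " (columns.map (fun column => PySem.Str.strip ((PySem.Dict.mk row).getD column "")))

def duplicate_values (rows : List (List (String × String))) (columns : List String) : List (String × Int) :=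
  let counts : PySem.Dict String Int := rows.foldl (fun counts row =>
      let key := pvMkKey columns row
      if PySem.Str.strip key = "" then counts
      else counts.insert key (counts.getD key 0 + 1)) PySem.Dict.empty
  PySem.List.sorted (counts.items.filter (fun item => decide (1 < item.2))) (fun item => item.1)

-- ===== PORT B =====
-- the outer while loop of B: each step consumes one maximal run keys[i:j] of the sorted key list
-- (j - i = 1 + length of the equal run after its first element)
def pvRuns : List String → List (String × Int)
  | [] => []
  | x :: xs =>
      let run := xs.takeWhile (fun y => y == x)
      let rest := xs.dropWhile (fun y => y == x)
      let c : Int := 1 + (run.length : Int)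
      if 1 < c then (x, c) :: pvRuns rest else pvRuns rest
termination_by l => l.length
decreasing_by
  all_goals simpa using Nat.lt_succ_of_le (List.length_dropWhile_le _ _)

def duplicate_values_alt (rows : List (List (String × String))) (columns : List String) : List (String × Int) :=
  let keys : List String := rows.foldl (fun keys row =>
      let key := pvMkKey columns row
      if PySem.Str.strip key = "" then keys else keys ++ [key]) []
  pvRuns (PySem.List.sorted keys (fun k => k))

-- ===== PRECONDITION & SPEC =====
def Spec_duplicate_values (rows : List (List (String × String))) (columns : List String) (out : List (String × Int)) : Prop := out = duplicate_values_alt rows columns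
instance (rows : List (List (String × String))) (columns : List String) (out : List (String × Int)) : Decidable (Spec_duplicate_values rows columns out) := by unfold Spec_duplicate_values; infer_instance

-- ===== CLAIM (what is proved, stated in full; the proofs are below) =====
def Claim_equal_duplicate_values : Prop := ∀ (rows : List (List (String × String))) (columns : List String), Dom_duplicate_values rows columns → Spec_duplicate_values rows columns (duplicate_values rows columns)

-- ===== LEMMAS AND PROOFS =====

-- the key list B collects (proof-side name for the foldl inside duplicate_values_alt)
def pvKeys (rows : List (List (String × String))) (columns : List String) : List String :=
  rows.foldl (fun keys row =>
      let key := pvMkKey columns row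
      if PySem.Str.strip key = "" then keys else keys ++ [key]) []

lemma pvInsMod (d : PySem.Dict String Int) (x : String) :
    d.insert x (d.getD x 0 + 1) = d.modify x 0 (fun v => v + 1) := by
  simp [PySem.Dict.insert, PySem.Dict.modify, PySem.Dict.getD]

-- A's counting loop, started on counter ks, is the counter of B's key list continued from ks
lemma pvFold_counter (columns : List String) :
    ∀ (rows : List (List (String × String))) (ks : List String),
      rows.foldl (fun counts row =>
          let key := pvMkKey columns row
          if PySem.Str.strip key = "" then counts
          else counts.insert key (counts.getD key 0 + 1)) (PySem.Dict.counter ks)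
        = PySem.Dict.counter (rows.foldl (fun keys row =>
            let key := pvMkKey columns row
            if PySem.Str.strip key = "" then keys else keys ++ [key]) ks) := by
  intro rows
  induction rows with
  | nil => intro ks; rfl
  | cons row rows ih =>
      intro ks
      simp only [List.foldl_cons]
      by_cases h : PySem.Str.strip (pvMkKey columns row) = ""
      · simp only [h, if_true]
        exact ih ks
      · simp only [if_neg h]
        rw [pvInsMod, ← PySem.Dict.counter_append_singleton]
        exact ih (ks ++ [pvMkKey columns row])

lemma pvDropWhile_head_false {α : Type} (p : α → Bool) :
    ∀ (l : List α) (a : α) (t : List α), l.dropWhile p = a :: t → p a = false := by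
  intro l
  induction l with
  | nil => intro a t h; simp [List.dropWhile] at h
  | cons x xs ih =>
      intro a t h
      rw [List.dropWhile_cons] at h
      split_ifs at h with hx
      · exact ih a t h
      · cases h; simpa using hx

-- the full characterisation of B's scan on a (≤)-sorted key list:
-- members are exactly the (k, count k) with count > 1, and first components strictly increase
lemma pvRuns_spec_aux :
    ∀ (n : Nat) (l : List String), l.length ≤ n → l.Pairwise (· ≤ ·) →
      (∀ p : String × Int, p ∈ pvRuns l ↔ (p.1 ∈ l ∧ p.2 = (l.count p.1 : Int) ∧ 1 < p.2)) ∧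
      (pvRuns l).Pairwise (fun a b => a.1 < b.1) := by
  intro n
  induction n with
  | zero =>
      intro l hl _
      have : l = [] := List.length_eq_zero_iff.mp (Nat.le_zero.mp hl)
      subst this
      exact ⟨fun p => by simp [pvRuns], by simp [pvRuns]⟩
  | succ n ihn =>
      intro l hl hpw
      cases l with
      | nil => exact ⟨fun p => by simp [pvRuns], by simp [pvRuns]⟩
      | cons x xs =>
      obtain ⟨hxle, hxs⟩ := List.pairwise_cons.mp hpw
      set run := xs.takeWhile (fun y => y == x) with hrun_def
      set rest := xs.dropWhile (fun y => y == x) with hrest_def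
      set c : Int := 1 + (run.length : Int) with hc_def
      have hrun : ∀ y ∈ run, y = x := by
        intro y hy
        have := List.mem_takeWhile_imp hy
        simpa using this
      have hrest_sub : rest.Sublist xs := List.dropWhile_sublist _
      have hrest_pw : rest.Pairwise (· ≤ ·) := List.Pairwise.sublist hrest_sub hxs
      have hrest_gt : ∀ y ∈ rest, x < y := by
        cases hr : rest with
        | nil => intro y hy; simp at hy
        | cons h0 t =>
            have hh0 : (h0 == x) = false := pvDropWhile_head_false _ xs h0 t (by rw [← hrest_def, hr])
            have hh0x : h0 ≠ x := by simpa using hh0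
            have hh0mem : h0 ∈ xs := hrest_sub.mem (by rw [hr]; exact List.mem_cons_self)
            have hxh0 : x < h0 := lt_of_le_of_ne (hxle h0 hh0mem) (Ne.symm hh0x)
            intro y hy
            rcases List.mem_cons.mp hy with rfl | hyt
            · exact hxh0
            · have := (List.pairwise_cons.mp (by rw [hr] at hrest_pw; exact hrest_pw)).1 y hyt
              exact lt_of_lt_of_le hxh0 this
      have hsplit : xs = run ++ rest := (List.takeWhile_append_dropWhile (p := fun y => y == x)).symm
      have hcount_run : ∀ k : String, run.count k = if k = x then run.length else 0 := by
        intro k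
        split_ifs with hk
        · subst hk
          exact List.count_eq_length.mpr (fun b hb => (hrun b hb).symm)
        · exact List.count_eq_zero.mpr (fun hm => hk (hrun k hm))
      have hcount_x : (((x :: xs).count x : Nat) : Int) = c := by
        rw [hsplit]
        have : (x :: (run ++ rest)).count x = 1 + run.length := by
          rw [List.count_cons_self, List.count_append,
              List.count_eq_zero.mpr (fun hm => lt_irrefl x (hrest_gt x hm)),
              hcount_run x, if_pos rfl]
          omega
        rw [this, hc_def]
        push_cast
        ring
      have hcount_gtx : ∀ k : String, x < k → (((x :: xs).count k : Nat) : Int) = ((rest.count k : Nat) : Int) := by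
        intro k hk
        rw [hsplit]
        rw [List.count_cons_of_ne (by intro h; subst h; exact lt_irrefl _ hk), List.count_append,
            hcount_run k, if_neg (by intro h; subst h; exact lt_irrefl _ hk)]
        simp
      have hrest_len : rest.length ≤ n := by
        have h1 : rest.length ≤ xs.length := by rw [hrest_def]; exact List.length_dropWhile_le _ _
        have h2 : xs.length + 1 ≤ n + 1 := by simpa using hl
        omega
      obtain ⟨ihmem, ihpw⟩ := ihn rest hrest_len hrest_pw
      have hstep : pvRuns (x :: xs) = if 1 < c then (x, c) :: pvRuns rest else pvRuns rest := by
        rw [pvRuns]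
      constructor
      · intro p
        rw [hstep]
        constructor
        · intro hp
          have hcases : p = (x, c) ∧ 1 < c ∨ p ∈ pvRuns rest := by
            split_ifs at hp with hc
            · rcases List.mem_cons.mp hp with rfl | h
              · exact Or.inl ⟨rfl, hc⟩
              · exact Or.inr h
            · exact Or.inr hp
          rcases hcases with ⟨rfl, hc⟩ | hmem
          · exact ⟨List.mem_cons_self, hcount_x.symm, hc⟩
          · obtain ⟨hk, hcnt, hgt⟩ := (ihmem p).mp hmem
            refine ⟨List.mem_cons_of_mem _ (hrest_sub.mem hk), ?_, hgt⟩
            rw [hcount_gtx p.1 (hrest_gt _ hk)]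
            exact hcnt
        · rintro ⟨hmem, hcnt, hgt⟩
          by_cases hpx : p.1 = x
          · have hpc : p.2 = c := by rw [hcnt, hpx, hcount_x]
            have hc : 1 < c := hpc ▸ hgt
            rw [if_pos hc]
            have hpeq : p = (x, c) := by
              obtain ⟨p1, p2⟩ := p
              simp only at hpx hpc
              rw [hpx, hpc]
            rw [hpeq]; exact List.mem_cons_self
          · have hmem' : p.1 ∈ rest := by
              rcases List.mem_cons.mp hmem with h | h
              · exact absurd h hpx
              · rw [hsplit] at h
                rcases List.mem_append.mp h with h | h
                · exact absurd (hrun _ h) hpx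
                · exact h
            have hrec : p ∈ pvRuns rest := by
              refine (ihmem p).mpr ⟨hmem', ?_, hgt⟩
              rw [← hcount_gtx p.1 (hrest_gt _ hmem')]
              exact hcnt
            split_ifs
            · exact List.mem_cons_of_mem _ hrec
            · exact hrec
      · rw [hstep]
        split_ifs with hc
        · refine List.pairwise_cons.mpr ⟨?_, ihpw⟩
          intro q hq
          obtain ⟨hk, _, _⟩ := (ihmem q).mp hq
          exact hrest_gt _ hk
        · exact ihpw

lemma pvRuns_spec (l : List String) (hpw : l.Pairwise (· ≤ ·)) :
    (∀ p : String × Int, p ∈ pvRuns l ↔ (p.1 ∈ l ∧ p.2 = (l.count p.1 : Int) ∧ 1 < p.2)) ∧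
    (pvRuns l).Pairwise (fun a b => a.1 < b.1) :=
  pvRuns_spec_aux l.length l le_rfl hpw

-- ===== VERDICT (by name: the statement is the Claim_ definition above) =====
theorem duplicate_values_spec : Claim_equal_duplicate_values := by
  intro rows columns _
  show duplicate_values rows columns = duplicate_values_alt rows columns
  simp only [duplicate_values, duplicate_values_alt]
  set keys := rows.foldl (fun keys row =>
      if PySem.Str.strip (pvMkKey columns row) = "" then keys else keys ++ [pvMkKey columns row])
    ([] : List String) with hkeys
  have hA : rows.foldl (fun counts row =>
        if PySem.Str.strip (pvMkKey columns row) = "" then counts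
        else counts.insert (pvMkKey columns row) (counts.getD (pvMkKey columns row) 0 + 1))
      (PySem.Dict.empty : PySem.Dict String Int) = PySem.Dict.counter keys := by
    rw [hkeys]
    exact pvFold_counter columns rows []
  rw [hA, PySem.Dict.items_counter]
  have hLpw : (PySem.List.sorted keys (fun k => k)).Pairwise (· ≤ ·) := by
    simpa using PySem.List.sorted_pairwise keys (fun k => k)
  have hLperm : (PySem.List.sorted keys (fun k => k)).Perm keys :=
    PySem.List.sorted_perm keys (fun k => k) false
  obtain ⟨hmem, hpwlt⟩ := pvRuns_spec _ hLpw
  have hnodup1 : (pvRuns (PySem.List.sorted keys (fun k => k))).Nodup := by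
    refine List.Pairwise.imp ?_ hpwlt
    intro a b h heq
    rw [heq] at h
    exact lt_irrefl _ h
  have hinj : Function.Injective (fun k => (k, (List.count k keys : Int))) := by
    intro a b h
    exact congrArg Prod.fst h
  have hnodup2 : (((PySem.Set.ofList keys).map (fun k => (k, (List.count k keys : Int)))).filter
      (fun item => decide (1 < item.2))).Nodup :=
    List.Nodup.filter _ (List.Nodup.map hinj (PySem.Set.nodup_ofList keys))
  have hperm : (pvRuns (PySem.List.sorted keys (fun k => k))).Perm
      (((PySem.Set.ofList keys).map (fun k => (k, (List.count k keys : Int)))).filter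
        (fun item => decide (1 < item.2))) := by
    rw [List.perm_ext_iff_of_nodup hnodup1 hnodup2]
    intro a
    rw [hmem a]
    simp only [List.mem_filter, List.mem_map, PySem.Set.mem_ofList, decide_eq_true_eq]
    rw [hLperm.mem_iff, hLperm.count_eq a.1]
    constructor
    · rintro ⟨hk, hcnt, hgt⟩
      exact ⟨⟨a.1, hk, by rw [← hcnt]⟩, hgt⟩
    · rintro ⟨⟨k, hk, rfl⟩, hgt⟩
      exact ⟨hk, rfl, hgt⟩
  exact PySem.List.sorted_eq_of_perm_of_pairwise_lt _ _ _ hperm hpwlt
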